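-- pv_equiv track=rewrite | github.com/Trismegistos84/algorithms | wine_selling.py | find_max_price_rec
-- ===== SOURCE A (Python) =====
-- def find_max_price_rec(prices):
--     if len(prices) == 0:
--         return 0
--
--     # left
--     rest = prices[1:]
--     price_left = prices[0] + find_max_price_rec(rest) + sum(rest)
--
--     # right
--     rest = prices[:-1]
--     price_right = prices[-1] + find_max_price_rec(rest) + sum(rest)
--
--     return max(price_left, price_right)
-- ===== SOURCE B (Python) =====
-- def find_max_price_rec(prices):
--     # Bottom-up interval DP over subarray lengths, O(n^2) instead of A's exponential recursion.
--     n = len(prices)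
--     dp = [0] * (n + 1)  # dp[i] = best revenue-style value for the length-(L-1) interval starting at i
--     s = [0] * (n + 1)   # s[i]  = sum of that interval
--     for L in range(1, n + 1):
--         row = [(max(prices[i] + dp[i + 1] + s[i + 1],
--                     prices[i + L - 1] + dp[i] + s[i]),
--                 s[i] + prices[i + L - 1])
--                for i in range(n - L + 1)]
--         dp = [v for v, _ in row]
--         s = [t for _, t in row]
--     return dp[0]
-- ===== Notes on version B (the rewrite author's own statement) =====
-- stated objective: faster
-- what changed: Replaced A's exponential take-left/take-right recursion by a bottom-up interval dynamic program over subarray lengths that also maintains interval sums, so each of the O(n^2) subintervals is evaluated once.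
import Mathlib
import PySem

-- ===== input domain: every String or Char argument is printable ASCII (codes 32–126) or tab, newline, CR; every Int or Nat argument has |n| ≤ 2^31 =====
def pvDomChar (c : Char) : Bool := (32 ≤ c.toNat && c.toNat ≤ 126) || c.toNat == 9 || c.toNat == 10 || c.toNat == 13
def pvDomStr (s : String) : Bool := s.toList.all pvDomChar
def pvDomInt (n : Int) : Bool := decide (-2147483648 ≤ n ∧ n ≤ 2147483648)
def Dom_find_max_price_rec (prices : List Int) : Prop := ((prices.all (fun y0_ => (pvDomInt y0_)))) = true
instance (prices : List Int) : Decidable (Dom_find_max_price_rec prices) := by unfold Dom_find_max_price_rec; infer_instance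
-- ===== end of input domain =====

-- B replaces A's exponential take-left/take-right recursion by a bottom-up interval DP
-- over subarray lengths (with interval sums maintained alongside): objective = faster.

-- ===== PORT A =====
-- literal transliteration of A; the pyGetD defaults are unreachable (the list is
-- nonempty in that branch, so prices[0] / prices[-1] are in range)
def find_max_price_rec (prices : List Int) : Int :=
  if prices.length = 0 then 0
  else
    let rest₁ := PySem.List.slice prices (some 1) none            -- prices[1:]
    let price_left := PySem.List.pyGetD prices 0 0 + find_max_price_rec rest₁ + rest₁.sum
    let rest₂ := PySem.List.slice prices none (some (-1))         -- prices[:-1]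
    let price_right := PySem.List.pyGetD prices (-1) 0 + find_max_price_rec rest₂ + rest₂.sum
    max price_left price_right
termination_by prices.length
decreasing_by
  · simp only [PySem.List.slice_from_one, List.length_tail]; omega
  · simp only [PySem.List.slice_to_neg_one, List.length_dropLast]; omega

-- ===== PORT B =====
-- one pass of B's inner comprehension: from the length-(L-1) rows (dp, s) build the
-- length-L rows; all indices are in range, so List.getD's default is unreachable
def pvStepB (prices : List Int) (n : Nat) (st : List Int × List Int) (L' : Nat) :
    List Int × List Int :=
  let L := L' + 1
  let dp := st.1
  let s := st.2
  let row := (List.range (n - L + 1)).map (fun i =>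
    (max (prices.getD i 0 + dp.getD (i + 1) 0 + s.getD (i + 1) 0)
         (prices.getD (i + L - 1) 0 + dp.getD i 0 + s.getD i 0),
     s.getD i 0 + prices.getD (i + L - 1) 0))
  (row.map Prod.fst, row.map Prod.snd)

def find_max_price_rec_alt (prices : List Int) : Int :=
  let n := prices.length
  let fin := (List.range n).foldl (pvStepB prices n)
    (List.replicate (n + 1) 0, List.replicate (n + 1) 0)
  fin.1.getD 0 0

-- ===== PRECONDITION & SPEC =====
def Spec_find_max_price_rec (prices : List Int) (out : Int) : Prop := out = find_max_price_rec_alt prices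
instance (prices : List Int) (out : Int) : Decidable (Spec_find_max_price_rec prices out) := by unfold Spec_find_max_price_rec; infer_instance

-- ===== CLAIM (what is proved, stated in full; the proofs are below) =====
def Claim_equal_find_max_price_rec : Prop := ∀ (prices : List Int), Dom_find_max_price_rec prices → Spec_find_max_price_rec prices (find_max_price_rec prices)

-- ===== LEMMAS AND PROOFS =====

theorem pvGetD_eq (l : List Int) (n : Nat) (h : n < l.length) : l.getD n 0 = l[n] := by
  simp [List.getD_eq_getElem?_getD, List.getElem?_eq_getElem h]

theorem pvTail_take (xs : List Int) (L : Nat) : (xs.take (L + 1)).tail = xs.tail.take L := by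
  cases xs <;> simp

theorem findA_nil : find_max_price_rec [] = 0 := by
  rw [find_max_price_rec]; simp

theorem findA_unfold (l : List Int) (h : l ≠ []) :
    find_max_price_rec l =
      max (l.getD 0 0 + find_max_price_rec l.tail + l.tail.sum)
          (l.getD (l.length - 1) 0 + find_max_price_rec l.dropLast + l.dropLast.sum) := by
  rw [find_max_price_rec]
  have hlen : l.length ≠ 0 := by simpa using h
  simp only [if_neg hlen, PySem.List.slice_from_one, PySem.List.slice_to_neg_one]
  congr 2
  · rw [PySem.List.pyGetD_zero]
  · rw [PySem.List.pyGetD_neg_one l 0 h, List.getLast_eq_getElem,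
      pvGetD_eq l (l.length - 1) (by omega)]

-- the state after the first L iterations of B's loop: row i holds A's value and the
-- sum of the length-L window starting at i
def pvState (p : List Int) (L : Nat) : List Int × List Int :=
  ((List.range (p.length - L + 1)).map (fun i => find_max_price_rec ((p.drop i).take L)),
   (List.range (p.length - L + 1)).map (fun i => ((p.drop i).take L).sum))

theorem pvMapGetD (f : Nat → Int) (m i : Nat) (h : i < m) :
    ((List.range m).map f).getD i 0 = f i := by
  simp [List.getD_eq_getElem?_getD, h]

theorem pvWindow_step (p : List Int) (L i : Nat) (hi : i + L < p.length) :
    find_max_price_rec ((p.drop i).take (L + 1)) =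
      max (p.getD i 0 + find_max_price_rec ((p.drop (i + 1)).take L) + ((p.drop (i + 1)).take L).sum)
          (p.getD (i + L) 0 + find_max_price_rec ((p.drop i).take L) + ((p.drop i).take L).sum) := by
  set l := (p.drop i).take (L + 1) with hl
  have hlen : l.length = L + 1 := by
    simp [hl, List.length_take, List.length_drop]; omega
  have hne : l ≠ [] := by
    intro h0; rw [h0] at hlen; simp at hlen
  rw [findA_unfold l hne]
  have htail : l.tail = (p.drop (i + 1)).take L := by
    rw [hl, pvTail_take, List.tail_drop]
  have hdl : l.dropLast = (p.drop i).take L := by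
    rw [hl, List.dropLast_eq_take, hlen]
    simp [List.take_take]
  have hhead : l.getD 0 0 = p.getD i 0 := by
    rw [pvGetD_eq l 0 (by omega), pvGetD_eq p i (by omega)]
    simp [hl]
  have hlast : l.getD (l.length - 1) 0 = p.getD (i + L) 0 := by
    rw [hlen]
    rw [show L + 1 - 1 = L from rfl, pvGetD_eq l L (by omega), pvGetD_eq p (i + L) (by omega)]
    simp [hl]
  rw [htail, hdl, hhead, hlast]

theorem pvSum_step (p : List Int) (L i : Nat) (hi : i + L < p.length) :
    ((p.drop i).take L).sum + p.getD (i + L) 0 = ((p.drop i).take (L + 1)).sum := by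
  have hget : (p.drop i)[L]? = some p[i + L] := by
    rw [List.getElem?_drop]
    exact List.getElem?_eq_getElem (by omega)
  rw [List.take_add_one, hget, pvGetD_eq p (i + L) (by omega)]
  simp

theorem pvState_succ (p : List Int) (L : Nat) (hL : L + 1 ≤ p.length) :
    pvStepB p p.length (pvState p L) L = pvState p (L + 1) := by
  refine Prod.ext ?_ ?_
  · simp only [pvStepB, pvState, List.map_map]
    refine List.map_congr_left ?_
    intro i hi
    rw [List.mem_range] at hi
    have hiL : i + L < p.length := by omega
    simp only [Function.comp_apply]
    rw [show i + (L + 1) - 1 = i + L from by omega]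
    rw [pvMapGetD (fun j => find_max_price_rec ((p.drop j).take L)) (p.length - L + 1) (i + 1) (by omega),
      pvMapGetD (fun j => ((p.drop j).take L).sum) (p.length - L + 1) (i + 1) (by omega),
      pvMapGetD (fun j => find_max_price_rec ((p.drop j).take L)) (p.length - L + 1) i (by omega),
      pvMapGetD (fun j => ((p.drop j).take L).sum) (p.length - L + 1) i (by omega)]
    exact (pvWindow_step p L i hiL).symm
  · simp only [pvStepB, pvState, List.map_map]
    refine List.map_congr_left ?_
    intro i hi
    rw [List.mem_range] at hi
    have hiL : i + L < p.length := by omega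
    simp only [Function.comp_apply]
    rw [show i + (L + 1) - 1 = i + L from by omega]
    rw [pvMapGetD (fun j => ((p.drop j).take L).sum) (p.length - L + 1) i (by omega)]
    exact pvSum_step p L i hiL

theorem pvState_inv (p : List Int) (L : Nat) (hL : L ≤ p.length) :
    (List.range L).foldl (pvStepB p p.length)
      (List.replicate (p.length + 1) 0, List.replicate (p.length + 1) 0) = pvState p L := by
  induction L with
  | zero =>
    simp only [List.range_zero, List.foldl_nil]
    unfold pvState
    refine Prod.ext ?_ ?_ <;>
    · dsimp only
      symm
      rw [List.eq_replicate_iff]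
      refine ⟨by simp, ?_⟩
      intro b hb
      obtain ⟨j, -, rfl⟩ := List.mem_map.mp hb
      simp [findA_nil]
  | succ L ih =>
    rw [List.range_succ, List.foldl_append, ih (by omega), List.foldl_cons, List.foldl_nil]
    exact pvState_succ p L hL

theorem altB_eq (p : List Int) : find_max_price_rec_alt p = find_max_price_rec p := by
  simp only [find_max_price_rec_alt]
  rw [pvState_inv p p.length le_rfl]
  unfold pvState
  simp [List.range_one, List.take_length]

-- ===== VERDICT (by name: the statement is the Claim_ definition above) =====
theorem find_max_price_rec_spec : Claim_equal_find_max_price_rec := by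
  intro prices _
  unfold Spec_find_max_price_rec
  exact (altB_eq prices).symm
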